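-- pv_equiv track=rewrite | github.com/yehudav/Project-Euler | problem 11.py | square_matrix_up_right_diagonals_max_product
-- ===== SOURCE A (Python) =====
-- def max_of_three(a, b, c):
--     return max(a, max(b, c))
--
-- def max_product(line, adjacent_digits_num):
--     max_product_of_line = 0
--
--     while len(line) >= adjacent_digits_num:
--         current_product = 1
--
--         for i in range(adjacent_digits_num):
--             current_product *= int(line[i])
--
--         max_product_of_line = max(current_product, max_product_of_line)
--
--         line = line[1:]
--
--     return max_product_of_line
--
-- def square_matrix_up_right_diagonals_max_product(m, adjacent_digits_number, matrix_len):
--     max_up_right_diagonals_product = 0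
--
--     for i in range(matrix_len - adjacent_digits_number + 1):
--         k = matrix_len - 1
--         j = k - i
--         diagonal_a = []
--         diagonal_b = []
--
--         for n in range(matrix_len - i):
--             diagonal_a.append(m[k][n + i])
--             diagonal_b.append(m[j][n])
--             k -= 1
--             j -= 1
--
--         a_product = max_product(diagonal_a, adjacent_digits_number)
--         b_product = max_product(diagonal_b, adjacent_digits_number)
--
--         max_up_right_diagonals_product = max_of_three(max_up_right_diagonals_product, a_product, b_product)
--
--     return max_up_right_diagonals_product
-- ===== SOURCE B (Python) =====
-- def _window_max(xs, k):
--     # max over all length-k windows of their product (0 if none), via a sliding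
--     # product maintained with a zero-count so each element is touched O(1) times
--     best = 0
--     prod = 1
--     zeros = 0
--     for i, x in enumerate(xs):
--         if x == 0:
--             zeros += 1
--         else:
--             prod *= x
--         if i >= k:
--             y = xs[i - k]
--             if y == 0:
--                 zeros -= 1
--             else:
--                 prod //= y
--         if i >= k - 1 and zeros == 0:
--             best = max(best, prod)
--     return best
--
--
-- def square_matrix_up_right_diagonals_max_product(m, adjacent_digits_number, matrix_len):
--     k = adjacent_digits_number
--     L = matrix_len
--     best = 0
--     # walk the anti-diagonals by their constant row+column sum s; only sums in
--     # [k-1, 2L-1-k] give a diagonal of length >= k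
--     for s in range(k - 1, 2 * L - k):
--         lo = max(0, s - L + 1)
--         hi = min(L - 1, s)
--         diag = [m[r][s - r] for r in range(hi, lo - 1, -1)]
--         best = max(best, _window_max(diag, k))
--     return best
-- ===== Notes on version B (the rewrite author's own statement) =====
-- stated objective: alternative
-- what changed: B walks each anti-diagonal once by its constant row+column sum and keeps a sliding window product with a zero count (dividing out the element that leaves the window), instead of A's building two diagonal lists per offset and recomputing every window's product from scratch on a repeatedly re-sliced list.
import Mathlib
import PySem

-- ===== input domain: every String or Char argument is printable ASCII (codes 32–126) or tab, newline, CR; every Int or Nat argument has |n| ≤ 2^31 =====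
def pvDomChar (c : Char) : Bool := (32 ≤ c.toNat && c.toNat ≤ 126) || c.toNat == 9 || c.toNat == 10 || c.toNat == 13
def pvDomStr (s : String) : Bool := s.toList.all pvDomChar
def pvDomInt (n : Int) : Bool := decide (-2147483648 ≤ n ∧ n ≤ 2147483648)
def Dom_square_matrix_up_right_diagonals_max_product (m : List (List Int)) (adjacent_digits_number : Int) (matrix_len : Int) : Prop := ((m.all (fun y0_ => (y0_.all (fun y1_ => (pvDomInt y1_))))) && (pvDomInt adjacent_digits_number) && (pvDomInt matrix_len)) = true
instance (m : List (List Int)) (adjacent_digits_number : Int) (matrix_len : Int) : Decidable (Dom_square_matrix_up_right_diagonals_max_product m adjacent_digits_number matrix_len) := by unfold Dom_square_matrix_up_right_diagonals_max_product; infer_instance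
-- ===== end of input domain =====

-- B replaces A's per-offset diagonal building and per-window product recomputation by one
-- anti-diagonal walk with a sliding window product and zero count.

-- ===== PORT A =====
def pvMaxOfThree (a b c : Int) : Int := max a (max b c)

-- while-loop of max_product: acc is max_product_of_line; line = line[1:] is the tail
-- (PySem.List.slice_from_one); on [] with adjacent_digits_num ≤ 0 Python loops forever: unreachable under Pre_
def pvMaxProduct (adjacent_digits_num : Int) (line : List Int) (acc : Int) : Int :=
  match line with
  | [] => acc
  | x :: rest =>
    if adjacent_digits_num ≤ ((x :: rest).length : Int) then
      pvMaxProduct adjacent_digits_num rest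
        (max ((PySem.List.pyRange 0 adjacent_digits_num 1).foldl
                (fun p i => p * PySem.List.pyGetD (x :: rest) i 0) 1) acc)
    else acc

def square_matrix_up_right_diagonals_max_product (m : List (List Int)) (adjacent_digits_number : Int) (matrix_len : Int) : Int :=
  (PySem.List.pyRange 0 (matrix_len - adjacent_digits_number + 1) 1).foldl
    (fun acc i =>
      let st := (PySem.List.pyRange 0 (matrix_len - i) 1).foldl
        (fun (st : List Int × List Int × Int × Int) n =>
          (st.1 ++ [PySem.List.pyGetD (PySem.List.pyGetD m st.2.2.1 ([] : List Int)) (n + i) 0],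
           st.2.1 ++ [PySem.List.pyGetD (PySem.List.pyGetD m st.2.2.2 ([] : List Int)) n 0],
           st.2.2.1 - 1, st.2.2.2 - 1))
        ([], [], matrix_len - 1, matrix_len - 1 - i)
      pvMaxOfThree acc (pvMaxProduct adjacent_digits_number st.1 0)
        (pvMaxProduct adjacent_digits_number st.2.1 0))
    0

-- ===== PORT B =====
-- loop body of _window_max: state (best, prod, zeros), element (i, x)
def pvWinStep (xs : List Int) (k : Int) (st : Int × Int × Int) (p : Int × Int) : Int × Int × Int :=
  let best := st.1
  let pz : Int × Int := if p.2 = 0 then (st.2.1, st.2.2 + 1) else (st.2.1 * p.2, st.2.2)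
  let pz2 : Int × Int :=
    if k ≤ p.1 then
      let y := PySem.List.pyGetD xs (p.1 - k) 0
      if y = 0 then (pz.1, pz.2 - 1) else (PySem.Int.floordiv pz.1 y, pz.2)
    else pz
  let best2 := if k - 1 ≤ p.1 ∧ pz2.2 = 0 then max best pz2.1 else best
  (best2, pz2.1, pz2.2)

def pvWindowMax (xs : List Int) (k : Int) : Int :=
  ((PySem.List.enumerate xs).foldl (pvWinStep xs k) (0, 1, 0)).1

def square_matrix_up_right_diagonals_max_product_alt (m : List (List Int)) (adjacent_digits_number : Int) (matrix_len : Int) : Int :=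
  (PySem.List.pyRange (adjacent_digits_number - 1) (2 * matrix_len - adjacent_digits_number) 1).foldl
    (fun best s =>
      let lo := max 0 (s - matrix_len + 1)
      let hi := min (matrix_len - 1) s
      let diag := (PySem.List.pyRange hi (lo - 1) (-1)).map
        (fun r => PySem.List.pyGetD (PySem.List.pyGetD m r ([] : List Int)) (s - r) 0)
      max best (pvWindowMax diag adjacent_digits_number))
    0

-- ===== PRECONDITION & SPEC =====
-- Pre_ excludes exactly the inputs on which Python A does not return: when the outer loop runs
-- (matrix_len ≥ adjacent_digits_number), adjacent_digits_number ≤ 0 makes max_product's while-loop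
-- spin forever, and A raises IndexError unless row r reaches every visited anti-diagonal,
-- i.e. has length ≥ min matrix_len (2*matrix_len - adjacent_digits_number - r).
def Pre_square_matrix_up_right_diagonals_max_product (m : List (List Int)) (adjacent_digits_number : Int) (matrix_len : Int) : Prop :=
  matrix_len < adjacent_digits_number ∨
    (1 ≤ adjacent_digits_number ∧ matrix_len ≤ (m.length : Int) ∧ ∀ r ∈ List.range matrix_len.toNat,
      min matrix_len (2 * matrix_len - adjacent_digits_number - (r : Int)) ≤ ((m.getD r []).length : Int))
instance (m : List (List Int)) (adjacent_digits_number : Int) (matrix_len : Int) : Decidable (Pre_square_matrix_up_right_diagonals_max_product m adjacent_digits_number matrix_len) := by unfold Pre_square_matrix_up_right_diagonals_max_product; infer_instance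

def pvWitness_square_matrix_up_right_diagonals_max_product : List (List Int) × Int × Int := ([[1, 2], [3, 4]], 2, 2)

def Spec_square_matrix_up_right_diagonals_max_product (m : List (List Int)) (adjacent_digits_number : Int) (matrix_len : Int) (out : Int) : Prop := out = square_matrix_up_right_diagonals_max_product_alt m adjacent_digits_number matrix_len
instance (m : List (List Int)) (adjacent_digits_number : Int) (matrix_len : Int) (out : Int) : Decidable (Spec_square_matrix_up_right_diagonals_max_product m adjacent_digits_number matrix_len out) := by unfold Spec_square_matrix_up_right_diagonals_max_product; infer_instance

-- ===== CLAIM (what is proved, stated in full; the proofs are below) =====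
def Claim_equal_square_matrix_up_right_diagonals_max_product : Prop := ∀ (m : List (List Int)) (adjacent_digits_number : Int) (matrix_len : Int), Dom_square_matrix_up_right_diagonals_max_product m adjacent_digits_number matrix_len → Pre_square_matrix_up_right_diagonals_max_product m adjacent_digits_number matrix_len → Spec_square_matrix_up_right_diagonals_max_product m adjacent_digits_number matrix_len (square_matrix_up_right_diagonals_max_product m adjacent_digits_number matrix_len)

-- ===== LEMMAS AND PROOFS =====

-- canonical description shared by the two proofs: window products along a list
def pvWinProd (xs : List Int) (k j : Nat) : Int := ((xs.drop j).take k).prod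
-- max (with 0) of the products of all k-windows lying inside the first t entries
def pvPmax (xs : List Int) (k t : Nat) : Int :=
  (List.range (t + 1 - k)).foldl (fun acc j => max acc (pvWinProd xs k j)) 0
-- product of the nonzero entries
def pvNzP (l : List Int) : Int := (l.filter (· != 0)).prod
-- current sliding window
def pvWind (xs : List Int) (k t : Nat) : List Int := (xs.take t).drop (t - k)
-- the anti-diagonal with row+column sum s, bottom row first (exactly B's comprehension)
def pvDiagF (m : List (List Int)) (L s : Int) : List Int :=
  (PySem.List.pyRange (min (L - 1) s) (max 0 (s - L + 1) - 1) (-1)).map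
    (fun r => PySem.List.pyGetD (PySem.List.pyGetD m r ([] : List Int)) (s - r) 0)
def pvFF (m : List (List Int)) (L : Int) (k : Nat) (s : Int) : Int :=
  pvPmax (pvDiagF m L s) k (pvDiagF m L s).length
def pvMFold (m : List (List Int)) (L : Int) (k : Nat) (l : List Int) : Int :=
  l.foldl (fun acc s => max acc (pvFF m L k s)) 0

theorem pv_foldl_max_init {α : Type} (F : α → Int) (l : List α) (a b : Int) :
    l.foldl (fun acc s => max acc (F s)) (max a b) = max a (l.foldl (fun acc s => max acc (F s)) b) := by
  induction l generalizing b with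
  | nil => rfl
  | cons x t ih =>
    simp only [List.foldl_cons]
    rw [max_assoc]
    exact ih (max b (F x))

theorem pv_init_le_foldl_max {α : Type} (F : α → Int) (l : List α) (a : Int) :
    a ≤ l.foldl (fun acc s => max acc (F s)) a := by
  induction l generalizing a with
  | nil => exact le_rfl
  | cons x t ih => exact le_trans (le_max_left _ _) (ih (max a (F x)))

theorem pvPmax_nonneg (xs : List Int) (k t : Nat) : 0 ≤ pvPmax xs k t :=
  pv_init_le_foldl_max _ _ 0

theorem pvPmax_short (xs : List Int) (k t : Nat) (h : t < k) : pvPmax xs k t = 0 := by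
  unfold pvPmax
  rw [Nat.sub_eq_zero_of_le (by omega)]
  rfl

theorem pvPmax_succ (xs : List Int) (k t : Nat) (h : k ≤ t + 1) :
    pvPmax xs k (t + 1) = max (pvPmax xs k t) (pvWinProd xs k (t + 1 - k)) := by
  unfold pvPmax
  rw [show t + 1 + 1 - k = (t + 1 - k) + 1 by omega, List.range_succ, List.foldl_append]
  rfl

theorem pvPmax_cons (x : Int) (rest : List Int) (k : Nat) (h : k ≤ rest.length + 1) :
    pvPmax (x :: rest) k (rest.length + 1)
      = max ((x :: rest).take k).prod (pvPmax rest k rest.length) := by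
  unfold pvPmax
  rw [show rest.length + 1 + 1 - k = (rest.length + 1 - k) + 1 by omega, List.range_succ_eq_map,
    List.foldl_cons, List.foldl_map]
  have h0 : pvWinProd (x :: rest) k 0 = ((x :: rest).take k).prod := by
    simp [pvWinProd]
  have hs : ∀ j : Nat, pvWinProd (x :: rest) k (j + 1) = pvWinProd rest k j := by
    intro j; simp [pvWinProd]
  simp only [Nat.succ_eq_add_one, hs, h0]
  rw [max_comm (0 : Int), pv_foldl_max_init]

theorem pv_prodTake (xs : List Int) (k : Nat) (h : k ≤ xs.length) :
    (PySem.List.pyRange 0 (k : Int) 1).foldl (fun p i => p * PySem.List.pyGetD xs i 0) 1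
      = (xs.take k).prod := by
  induction k with
  | zero => simp [PySem.List.pyRange_one_eq_nil]
  | succ n ih =>
    rw [show ((n + 1 : Nat) : Int) = (n : Int) + 1 by push_cast; ring,
      PySem.List.pyRange_one_succ_right (by exact_mod_cast Int.natCast_nonneg n),
      List.foldl_append, ih (by omega)]
    simp only [List.foldl_cons, List.foldl_nil, PySem.List.pyGetD_natCast]
    rw [List.getD_eq_getElem xs 0 (by omega : n < xs.length),
      List.prod_take_succ xs n (by omega)]

theorem pvMaxProduct_eq (k : Nat) (hk : 1 ≤ k) (xs : List Int) (acc : Int) (ha : 0 ≤ acc) :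
    pvMaxProduct (k : Int) xs acc = max acc (pvPmax xs k xs.length) := by
  induction xs generalizing acc with
  | nil =>
    rw [pvMaxProduct, List.length_nil, pvPmax_short _ _ _ (by omega), max_eq_left ha]
  | cons x rest ih =>
    by_cases hlen : (k : Int) ≤ (((x :: rest).length : Nat) : Int)
    · have hk' : k ≤ rest.length + 1 := by
        have := hlen; simp only [List.length_cons] at this; exact_mod_cast this
      rw [pvMaxProduct, if_pos hlen, pv_prodTake (x :: rest) k (by simpa using hk'),
        ih _ (le_trans ha (le_max_right _ _)), List.length_cons,
        pvPmax_cons x rest k hk', max_comm _ acc, max_assoc]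
    · have hk' : rest.length + 1 < k := by
        have := hlen; simp only [List.length_cons] at this; omega
      rw [pvMaxProduct, if_neg hlen, List.length_cons,
        pvPmax_short _ _ _ (by omega), max_eq_left ha]

theorem pvWind_eq_take (xs : List Int) (k t : Nat) (h : t ≤ k) : pvWind xs k t = xs.take t := by
  simp [pvWind, Nat.sub_eq_zero_of_le h]

theorem pvWind_head (xs : List Int) (k t : Nat) (hk : 1 ≤ k) (hkt : k ≤ t) (ht : t ≤ xs.length) :
    pvWind xs k t = xs[t - k]'(by omega) :: (xs.take t).drop (t + 1 - k) := by
  unfold pvWind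
  rw [List.drop_eq_getElem_cons (by simp [List.length_take]; omega),
    show t - k + 1 = t + 1 - k by omega]
  congr 1
  exact List.getElem_take

theorem pvWind_succ_ge (xs : List Int) (k t : Nat) (hk : 1 ≤ k) (ht : t < xs.length) :
    pvWind xs k (t + 1) = (xs.take t).drop (t + 1 - k) ++ [xs[t]] := by
  unfold pvWind
  rw [List.take_add_one, List.getElem?_eq_getElem ht]
  rw [List.drop_append_of_le_length (by simp [List.length_take]; omega)]
  rfl

theorem pvStepAdd (l : List Int) (x : Int) :
    (if x = 0 then (pvNzP l, (l.count 0 : Int) + 1) else (pvNzP l * x, (l.count 0 : Int)))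
      = (pvNzP (l ++ [x]), ((l ++ [x]).count 0 : Int)) := by
  by_cases hx : x = 0 <;>
    simp [pvNzP, List.filter_append, List.count_append, hx]

theorem pvStepRemove (y : Int) (l : List Int) :
    (if y = 0 then (pvNzP (y :: l), (((y :: l).count 0 : Nat) : Int) - 1)
     else (PySem.Int.floordiv (pvNzP (y :: l)) y, (((y :: l).count 0 : Nat) : Int)))
      = (pvNzP l, ((l.count 0 : Nat) : Int)) := by
  by_cases hy : y = 0
  · simp [hy, pvNzP]
  · simp only [hy, if_false, pvNzP, List.filter_cons, List.count_cons]
    simp [hy, PySem.Int.floordiv, Int.mul_fdiv_cancel_left _ hy]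

theorem pvProd_eq (l : List Int) : l.prod = if l.count 0 = 0 then pvNzP l else 0 := by
  by_cases h : l.count 0 = 0
  · rw [if_pos h]
    unfold pvNzP
    rw [List.filter_eq_self.mpr]
    intro a ha
    have h0 : (0 : Int) ∉ l := List.count_eq_zero.mp h
    have : a ≠ 0 := fun e => h0 (e ▸ ha)
    simpa using this
  · rw [if_neg h]
    exact List.prod_eq_zero (List.count_pos_iff.mp (by omega))

theorem pvWinProd_wind (xs : List Int) (k t : Nat) (hk : k ≤ t) (_ht : t ≤ xs.length) :
    pvWinProd xs k (t - k) = (pvWind xs k t).prod := by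
  unfold pvWinProd pvWind
  rw [List.drop_take, show t - (t - k) = k by omega]

theorem pvWinB_inv (xs : List Int) (k : Nat) (hk : 1 ≤ k) (t : Nat) (ht : t ≤ xs.length) :
    (PySem.List.enumerate (xs.take t) 0).foldl (pvWinStep xs (k : Int)) (0, 1, 0)
      = (pvPmax xs k t, pvNzP (pvWind xs k t), ((pvWind xs k t).count 0 : Int)) := by
  induction t with
  | zero =>
    simp [pvWind, pvNzP, pvPmax_short xs k 0 (by omega), PySem.List.enumerate_nil]
  | succ t ih =>
    have ht' : t < xs.length := by omega
    have ihh := ih (by omega)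
    have hlen : (xs.take t).length = t := by simp [List.length_take]; omega
    rw [List.take_add_one, List.getElem?_eq_getElem ht']
    simp only [Option.toList_some]
    rw [PySem.List.enumerate_append, List.foldl_append, ihh, hlen]
    rw [PySem.List.enumerate_cons, PySem.List.enumerate_nil]
    simp only [List.foldl_cons, List.foldl_nil]
    rw [show (0 : Int) + (t : Int) = (t : Int) by ring]
    unfold pvWinStep
    simp only []
    by_cases hkt : k ≤ t
    · -- sliding case: an element leaves the window
      have hcond : ((k : Int) ≤ (t : Int)) := by exact_mod_cast hkt
      have hy : PySem.List.pyGetD xs ((t : Int) - (k : Int)) 0 = xs[t - k]'(by omega) := by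
        rw [show (t : Int) - (k : Int) = ((t - k : Nat) : Int) by omega,
          PySem.List.pyGetD_natCast, List.getD_eq_getElem xs 0 (by omega)]
      have hwt := pvWind_head xs k t hk hkt (by omega)
      have hwt1 := pvWind_succ_ge xs k t hk ht'
      rw [hwt]
      rw [pvStepAdd ((xs[t - k]'(by omega)) :: (xs.take t).drop (t + 1 - k)) xs[t]]
      rw [List.cons_append]
      rw [if_pos hcond, hy]
      rw [pvStepRemove (xs[t - k]'(by omega)) ((xs.take t).drop (t + 1 - k) ++ [xs[t]])]
      rw [← hwt1]
      by_cases hz : (pvWind xs k (t + 1)).count 0 = 0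
      · rw [if_pos ⟨by omega, by simp [hz]⟩]
        simp only [Prod.mk.injEq, and_true]
        rw [pvPmax_succ xs k t (by omega), pvWinProd_wind xs k (t + 1) (by omega) ht,
          pvProd_eq, if_pos hz]
      · rw [if_neg (by simp [hz])]
        simp only [Prod.mk.injEq, and_true]
        rw [pvPmax_succ xs k t (by omega), pvWinProd_wind xs k (t + 1) (by omega) ht,
          pvProd_eq, if_neg hz, max_eq_left (pvPmax_nonneg xs k t)]
    · -- growing case: the window only gains the new element
      have hcond : ¬ ((k : Int) ≤ (t : Int)) := by exact_mod_cast hkt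
      rw [pvWind_eq_take xs k t (by omega)] at ihh ⊢
      rw [pvStepAdd (xs.take t) xs[t]]
      rw [if_neg hcond]
      rw [show xs.take t ++ [xs[t]] = xs.take (t + 1) from by
        rw [List.take_add_one, List.getElem?_eq_getElem ht']; rfl]
      rw [← pvWind_eq_take xs k (t + 1) (by omega)]
      by_cases hk1 : k ≤ t + 1
      · by_cases hz : (pvWind xs k (t + 1)).count 0 = 0
        · rw [if_pos ⟨by omega, by simp [hz]⟩]
          simp only [Prod.mk.injEq, and_true]
          rw [pvPmax_succ xs k t hk1, pvWinProd_wind xs k (t + 1) (by omega) ht,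
            pvProd_eq, if_pos hz]
        · rw [if_neg (by simp [hz])]
          simp only [Prod.mk.injEq, and_true]
          rw [pvPmax_succ xs k t hk1, pvWinProd_wind xs k (t + 1) (by omega) ht,
            pvProd_eq, if_neg hz, max_eq_left (pvPmax_nonneg xs k t)]
      · rw [if_neg (by push_cast; omega)]
        simp only [Prod.mk.injEq, and_true]
        rw [pvPmax_short xs k t (by omega), pvPmax_short xs k (t + 1) (by omega)]

theorem pvWindowMax_eq (xs : List Int) (k : Nat) (hk : 1 ≤ k) :
    pvWindowMax xs (k : Int) = pvPmax xs k xs.length := by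
  have h := pvWinB_inv xs k hk xs.length le_rfl
  rw [List.take_length] at h
  unfold pvWindowMax
  rw [h]

theorem pvBuildDiag (m : List (List Int)) (i : Int) (c : Nat) (da db : List Int) (kk j : Int) :
    (PySem.List.pyRange 0 (c : Int) 1).foldl
      (fun (st : List Int × List Int × Int × Int) n =>
        (st.1 ++ [PySem.List.pyGetD (PySem.List.pyGetD m st.2.2.1 ([] : List Int)) (n + i) 0],
         st.2.1 ++ [PySem.List.pyGetD (PySem.List.pyGetD m st.2.2.2 ([] : List Int)) n 0],
         st.2.2.1 - 1, st.2.2.2 - 1)) (da, db, kk, j)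
    = (da ++ (PySem.List.pyRange 0 (c : Int) 1).map
          (fun n => PySem.List.pyGetD (PySem.List.pyGetD m (kk - n) ([] : List Int)) (n + i) 0),
       db ++ (PySem.List.pyRange 0 (c : Int) 1).map
          (fun n => PySem.List.pyGetD (PySem.List.pyGetD m (j - n) ([] : List Int)) n 0),
       kk - c, j - c) := by
  induction c with
  | zero => simp [PySem.List.pyRange_one_eq_nil]
  | succ n ih =>
    rw [show ((n + 1 : Nat) : Int) = (n : Int) + 1 by push_cast; ring,
      PySem.List.pyRange_one_succ_right (by exact_mod_cast Int.natCast_nonneg n),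
      List.foldl_append, List.map_append, List.map_append, ih]
    simp only [List.foldl_cons, List.foldl_nil, List.map_cons, List.map_nil,
      List.append_assoc, Prod.mk.injEq]
    exact ⟨trivial, trivial, by ring, by ring⟩

theorem pvDiagA_eq (m : List (List Int)) (L i : Int) (h0 : 0 ≤ i) (h1 : i ≤ L - 1) :
    (PySem.List.pyRange 0 (L - i) 1).map
        (fun n => PySem.List.pyGetD (PySem.List.pyGetD m ((L - 1) - n) ([] : List Int)) (n + i) 0)
      = pvDiagF m L (L - 1 + i) := by
  unfold pvDiagF
  rw [show min (L - 1) (L - 1 + i) = L - 1 by omega,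
    show max 0 (L - 1 + i - L + 1) = i by omega,
    PySem.List.pyRange_neg_one, PySem.List.pyRange_one, List.map_map, List.map_map,
    show ((L - 1) - (i - 1)).toNat = (L - i - 0).toNat by omega]
  refine List.map_congr_left fun n hn => ?_
  simp only [Function.comp_apply]
  ring_nf

theorem pvDiagB_eq (m : List (List Int)) (L i : Int) (h0 : 0 ≤ i) (h1 : i ≤ L - 1) :
    (PySem.List.pyRange 0 (L - i) 1).map
        (fun n => PySem.List.pyGetD (PySem.List.pyGetD m ((L - 1 - i) - n) ([] : List Int)) n 0)
      = pvDiagF m L (L - 1 - i) := by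
  unfold pvDiagF
  rw [show min (L - 1) (L - 1 - i) = L - 1 - i by omega,
    show max 0 (L - 1 - i - L + 1) = 0 by omega,
    PySem.List.pyRange_neg_one, PySem.List.pyRange_one, List.map_map, List.map_map,
    show ((L - 1 - i) - (0 - 1)).toNat = (L - i - 0).toNat by omega]
  refine List.map_congr_left fun n hn => ?_
  simp only [Function.comp_apply]
  ring_nf

theorem pvAstep_eq (m : List (List Int)) (L : Int) (k : Nat) (hk : 1 ≤ k) (i : Int)
    (h0 : 0 ≤ i) (h1 : i ≤ L - 1) (acc : Int) :
    pvMaxOfThree acc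
      (pvMaxProduct (k : Int)
        ((PySem.List.pyRange 0 (L - i) 1).foldl
          (fun (st : List Int × List Int × Int × Int) n =>
            (st.1 ++ [PySem.List.pyGetD (PySem.List.pyGetD m st.2.2.1 ([] : List Int)) (n + i) 0],
             st.2.1 ++ [PySem.List.pyGetD (PySem.List.pyGetD m st.2.2.2 ([] : List Int)) n 0],
             st.2.2.1 - 1, st.2.2.2 - 1))
          ([], [], L - 1, L - 1 - i)).1 0)
      (pvMaxProduct (k : Int)
        ((PySem.List.pyRange 0 (L - i) 1).foldl
          (fun (st : List Int × List Int × Int × Int) n =>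
            (st.1 ++ [PySem.List.pyGetD (PySem.List.pyGetD m st.2.2.1 ([] : List Int)) (n + i) 0],
             st.2.1 ++ [PySem.List.pyGetD (PySem.List.pyGetD m st.2.2.2 ([] : List Int)) n 0],
             st.2.2.1 - 1, st.2.2.2 - 1))
          ([], [], L - 1, L - 1 - i)).2.1 0)
    = max acc (max (pvFF m L k (L - 1 + i)) (pvFF m L k (L - 1 - i))) := by
  have hLi : L - i = (((L - i).toNat : Nat) : Int) := by omega
  rw [hLi, pvBuildDiag]
  simp only [List.nil_append]
  rw [← hLi, pvDiagA_eq m L i h0 h1, pvDiagB_eq m L i h0 h1,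
    pvMaxProduct_eq k hk _ 0 le_rfl, pvMaxProduct_eq k hk _ 0 le_rfl]
  unfold pvMaxOfThree pvFF
  rw [max_eq_right (pvPmax_nonneg _ _ _), max_eq_right (pvPmax_nonneg _ _ _)]

theorem pvG_eq (m : List (List Int)) (L : Int) (k : Nat) (hk : 1 ≤ k) (j : Nat) (hj : 1 ≤ j)
    (hjn : (j : Int) ≤ L - (k : Int) + 1) :
    (PySem.List.pyRange 0 (j : Int) 1).foldl
      (fun acc i =>
        let st := (PySem.List.pyRange 0 (L - i) 1).foldl
          (fun (st : List Int × List Int × Int × Int) n =>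
            (st.1 ++ [PySem.List.pyGetD (PySem.List.pyGetD m st.2.2.1 ([] : List Int)) (n + i) 0],
             st.2.1 ++ [PySem.List.pyGetD (PySem.List.pyGetD m st.2.2.2 ([] : List Int)) n 0],
             st.2.2.1 - 1, st.2.2.2 - 1))
          ([], [], L - 1, L - 1 - i)
        pvMaxOfThree acc (pvMaxProduct (k : Int) st.1 0) (pvMaxProduct (k : Int) st.2.1 0))
      0
    = pvMFold m L k (PySem.List.pyRange (L - (j : Int)) (L + (j : Int) - 1) 1) := by
  induction j with
  | zero => omega
  | succ n ih =>
    by_cases hn : n = 0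
    · subst hn
      rw [show (((0 : Nat) + 1 : Nat) : Int) = (0 : Int) + 1 by norm_num,
        PySem.List.pyRange_one_singleton]
      simp only [List.foldl_cons, List.foldl_nil]
      rw [pvAstep_eq m L k hk 0 le_rfl (by push_cast at hjn; omega) 0]
      rw [show L + ((0 : Int) + 1) - 1 = (L - ((0 : Int) + 1)) + 1 by ring,
        PySem.List.pyRange_one_singleton]
      unfold pvMFold
      simp only [List.foldl_cons, List.foldl_nil]
      rw [show L - 1 + 0 = L - ((0 : Int) + 1) by ring,
        show L - 1 - 0 = L - ((0 : Int) + 1) by ring, max_self]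
    · have hn1 : 1 ≤ n := by omega
      have ihn := ih hn1 (by push_cast at hjn ⊢; omega)
      rw [show ((n + 1 : Nat) : Int) = (n : Int) + 1 by push_cast; ring,
        PySem.List.pyRange_one_succ_right (by exact_mod_cast Int.natCast_nonneg n),
        List.foldl_append, ihn]
      simp only [List.foldl_cons, List.foldl_nil]
      rw [pvAstep_eq m L k hk (n : Int) (Int.natCast_nonneg n) (by push_cast at hjn; omega)]
      rw [show L + ((n : Int) + 1) - 1 = (L + (n : Int) - 1) + 1 by ring,
        PySem.List.pyRange_one_succ_right (by push_cast at hjn; omega),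
        show PySem.List.pyRange (L - ((n : Int) + 1)) (L + (n : Int) - 1) 1
            = (L - ((n : Int) + 1)) :: PySem.List.pyRange (L - (n : Int)) (L + (n : Int) - 1) 1 by
          rw [PySem.List.pyRange_one_cons (by push_cast at hjn; omega),
            show L - ((n : Int) + 1) + 1 = L - (n : Int) by ring],
        List.cons_append]
      unfold pvMFold
      simp only [List.foldl_cons, List.foldl_append, List.foldl_nil]
      have hmc : (max 0 (pvFF m L k (L - ((n : Int) + 1))))
          = max (pvFF m L k (L - ((n : Int) + 1))) 0 := max_comm _ _
      rw [hmc, pv_foldl_max_init (pvFF m L k)]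
      rw [show L - 1 + (n : Int) = L + (n : Int) - 1 by ring,
        show L - 1 - (n : Int) = L - ((n : Int) + 1) by ring]
      generalize pvFF m L k (L + (n : Int) - 1) = A
      generalize pvFF m L k (L - ((n : Int) + 1)) = B
      generalize List.foldl (fun acc s => max acc (pvFF m L k s)) 0
        (PySem.List.pyRange (L - (n : Int)) (L + (n : Int) - 1) 1) = C
      omega

-- ===== VERDICT (by name: the statement is the Claim_ definition above) =====
theorem square_matrix_up_right_diagonals_max_product_spec : Claim_equal_square_matrix_up_right_diagonals_max_product := by
  intro m adj L hdom hpre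
  unfold Spec_square_matrix_up_right_diagonals_max_product
  rcases hpre with hlt | ⟨hk1, -, -⟩
  · unfold square_matrix_up_right_diagonals_max_product
      square_matrix_up_right_diagonals_max_product_alt
    rw [PySem.List.pyRange_one_eq_nil (by omega), PySem.List.pyRange_one_eq_nil (by omega)]
    rfl
  lift adj to ℕ using (by omega : (0 : Int) ≤ adj) with k'
  have hk : 1 ≤ k' := by exact_mod_cast hk1
  unfold square_matrix_up_right_diagonals_max_product
    square_matrix_up_right_diagonals_max_product_alt
  by_cases hN : L - (k' : Int) + 1 ≤ 0
  · rw [PySem.List.pyRange_one_eq_nil (by omega), PySem.List.pyRange_one_eq_nil (by omega)]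
    rfl
  · have hNc : (((L - (k' : Int) + 1).toNat : Nat) : Int) = L - (k' : Int) + 1 := by omega
    rw [← hNc]
    rw [pvG_eq m L k' hk (L - (k' : Int) + 1).toNat (by omega) (by rw [hNc])]
    rw [show L - (((L - (k' : Int) + 1).toNat : Nat) : Int) = (k' : Int) - 1 by omega,
      show L + (((L - (k' : Int) + 1).toNat : Nat) : Int) - 1 = 2 * L - (k' : Int) by omega]
    unfold pvMFold
    refine (PySem.List.foldl_congr_mem _ _ _ _ ?_).symm
    intro acc s hs
    show max acc (pvWindowMax (pvDiagF m L s) (k' : Int)) = max acc (pvFF m L k' s)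
    rw [pvWindowMax_eq _ _ hk]
    rfl
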